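-- pv_equiv track=rewrite | github.com/sl2902/helsinki_mooc | mooc-programming-22/part06-16_dictionary_file/src/dictionary_file.py | make_word_dict
-- ===== SOURCE A (Python) =====
-- def make_word_dict(word_list: list) -> dict:
--     word_dict = {}
--     if len (word_list) > 0:
--         for i, w in enumerate(word_list):
--             if i%2 == 0:
--                 k = w
--                 word_dict[k] = w
--             else:
--                 word_dict[k] = w
--     return word_dict
-- ===== SOURCE B (Python) =====
-- def make_word_dict(word_list: list) -> dict:
--     keys = word_list[::2]
--     values = word_list[1::2]
--     if len(word_list) % 2 == 1:
--         values = values + word_list[-1:]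
--     return dict(zip(keys, values))
-- ===== Notes on version B (the rewrite author's own statement) =====
-- stated objective: simpler
-- what changed: Replaces A's single stateful enumerate loop (index-parity branch with a leftover key variable) by staged passes: slice even-index words as keys and odd-index words as values, pad an odd tail with the last word, and build the dict from zip(keys, values).
import Mathlib
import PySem

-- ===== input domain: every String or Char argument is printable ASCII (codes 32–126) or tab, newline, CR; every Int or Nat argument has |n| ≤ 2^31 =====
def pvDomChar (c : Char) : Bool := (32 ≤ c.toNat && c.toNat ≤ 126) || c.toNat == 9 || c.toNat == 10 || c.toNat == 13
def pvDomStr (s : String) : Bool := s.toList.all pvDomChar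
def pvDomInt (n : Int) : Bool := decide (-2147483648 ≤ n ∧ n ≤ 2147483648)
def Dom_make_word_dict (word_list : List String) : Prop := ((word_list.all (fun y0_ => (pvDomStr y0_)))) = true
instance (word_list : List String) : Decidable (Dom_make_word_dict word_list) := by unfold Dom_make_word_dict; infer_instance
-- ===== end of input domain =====

-- B replaces A's single stateful enumerate loop by staged passes: slice the even-index
-- words as keys and the odd-index words as values, pad an odd tail with the last word,
-- and build the dict from zip(keys, values): simpler.


-- ===== PORT A =====
def make_word_dict (word_list : List String) : List (String × String) :=
  let init : PySem.Dict String String × String := (PySem.Dict.empty, "")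
  let st :=
    if word_list.length > 0 then
      (PySem.List.enumerate word_list 0).foldl
        (fun s iw =>
          if PySem.Int.mod iw.1 2 == 0 then (s.1.insert iw.2 iw.2, iw.2)
          else (s.1.insert s.2 iw.2, s.2)) init
    else init
  st.1.items

-- ===== PORT B =====
-- word_list[::2] / word_list[1::2]; slice? never fails for step 2, so '.getD []' is exact.
def make_word_dict_alt (word_list : List String) : List (String × String) :=
  let keys := (PySem.List.slice? word_list none none 2).getD []
  let values0 := (PySem.List.slice? word_list (some 1) none 2).getD []
  let values :=
    if word_list.length % 2 == 1 then values0 ++ PySem.List.slice word_list (some (-1)) none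
    else values0
  ((keys.zip values).foldl (fun d kv => d.insert kv.1 kv.2)
    (PySem.Dict.empty : PySem.Dict String String)).items

-- ===== PRECONDITION & SPEC =====
def Spec_make_word_dict (word_list : List String) (out : List (String × String)) : Prop := out = make_word_dict_alt word_list
instance (word_list : List String) (out : List (String × String)) : Decidable (Spec_make_word_dict word_list out) := by unfold Spec_make_word_dict; infer_instance

-- ===== CLAIM (what is proved, stated in full; the proofs are below) =====
def Claim_equal_make_word_dict : Prop := ∀ (word_list : List String), Dom_make_word_dict word_list → Spec_make_word_dict word_list (make_word_dict word_list)

-- ===== LEMMAS AND PROOFS =====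

-- canonical two-at-a-time recursion both ports are reduced to
def mwdLoop : List String → PySem.Dict String String → PySem.Dict String String
  | [], d => d
  | [k], d => d.insert k k
  | k :: v :: rest, d => mwdLoop rest (d.insert k v)

-- even-index / odd-index sublists
def evensL : List String → List String
  | [] => []
  | [a] => [a]
  | a :: _ :: r => a :: evensL r

def oddsL : List String → List String
  | [] => []
  | [_] => []
  | _ :: b :: r => b :: oddsL r

lemma mwd_loop_eq : ∀ (xs : List String) (d : PySem.Dict String String) (k : String) (n : Nat),
    ((PySem.List.enumerate xs (2 * (n : Int))).foldl
      (fun s iw =>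
        if PySem.Int.mod iw.1 2 == 0 then (s.1.insert iw.2 iw.2, iw.2)
        else (s.1.insert s.2 iw.2, s.2)) (d, k)).1 = mwdLoop xs d := by
  intro xs d k n
  induction xs, d using mwdLoop.induct generalizing k n with
  | case1 d =>
    simp [PySem.List.enumerate_nil, mwdLoop]
  | case2 k0 d =>
    simp [PySem.List.enumerate_cons, PySem.List.enumerate_nil, mwdLoop]
  | case3 k0 v rest d ih =>
    have hm : PySem.Int.mod (2 * (n : Int)) 2 = 0 := by
      rw [PySem.Int.mod_eq_emod_of_pos (by omega)]; omega
    have hm1 : PySem.Int.mod (2 * (n : Int) + 1) 2 = 1 := by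
      rw [PySem.Int.mod_eq_emod_of_pos (by omega)]; omega
    have hstep : (2 : Int) * (n : Int) + 1 + 1 = 2 * ((n + 1 : Nat) : Int) := by push_cast; ring
    simp only [PySem.List.enumerate_cons, List.foldl_cons, hm, hm1, beq_self_eq_true, if_true,
      PySem.Dict.insert_insert_self]
    simp only [show (((1:Int)) == 0) = false from rfl, Bool.false_eq_true, if_false]
    rw [hstep, ih]
    simp [mwdLoop]

lemma fm_evens : ∀ (xs : List String),
    (List.range ((xs.length + 1) / 2)).filterMap (fun k => xs[2*k]?) = evensL xs := by
  intro xs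
  induction xs using evensL.induct with
  | case1 => simp [evensL]
  | case2 a => simp [evensL]
  | case3 a b r ih =>
    have hc : ((a :: b :: r).length + 1) / 2 = (r.length + 1) / 2 + 1 := by
      simp [List.length_cons]; omega
    rw [hc, List.range_succ_eq_map, List.filterMap_cons, List.filterMap_map]
    have hf : ((fun k => (a :: b :: r)[2*k]?) ∘ Nat.succ) = fun k : Nat => r[2*k]? := by
      funext k
      have : 2 * Nat.succ k = (2*k + 1) + 1 := by omega
      simp [Function.comp, this]
    rw [hf, ih]
    simp [evensL]

lemma fm_odds : ∀ (xs : List String),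
    (List.range (xs.length / 2)).filterMap (fun k => xs[2*k+1]?) = oddsL xs := by
  intro xs
  induction xs using oddsL.induct with
  | case1 => simp [oddsL]
  | case2 a => simp [oddsL]
  | case3 a b r ih =>
    have hc : (a :: b :: r).length / 2 = r.length / 2 + 1 := by
      simp [List.length_cons]; omega
    rw [hc, List.range_succ_eq_map, List.filterMap_cons, List.filterMap_map]
    have hf : ((fun k => (a :: b :: r)[2*k+1]?) ∘ Nat.succ) = fun k : Nat => r[2*k+1]? := by
      funext k
      have : 2 * Nat.succ k + 1 = (2*k + 1 + 1) + 1 := by omega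
      simp [Function.comp, this]
    rw [hf, ih]
    simp [oddsL]

lemma slice2_evens (xs : List String) :
    PySem.List.slice? xs none none 2 = some (evensL xs) := by
  rw [← fm_evens]
  simp only [PySem.List.slice?, PySem.List.sliceIndices]
  norm_num
  have hc : (if 0 < xs.length then (((xs.length : Int) + 2 - 1) / 2).toNat else 0) = (xs.length + 1) / 2 := by
    split_ifs with h <;> omega
  rw [hc]
  apply List.filterMap_congr
  intro k _
  have h1 : ((2 * (k : Int)).toNat) = 2 * k := by omega
  rw [h1]

lemma slice2_odds (xs : List String) :
    PySem.List.slice? xs (some 1) none 2 = some (oddsL xs) := by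
  cases xs with
  | nil => rfl
  | cons x xs =>
    rw [show oddsL (x :: xs) = (List.range ((x::xs).length / 2)).filterMap (fun k => (x::xs)[2*k+1]?) from (fm_odds _).symm]
    simp only [PySem.List.slice?, PySem.List.sliceIndices]
    norm_num
    have hc : (if 0 < xs.length then (((xs.length : Int) + 2 - 1) / 2).toNat else 0) = (xs.length + 1) / 2 := by
      split_ifs with h <;> omega
    rw [hc]
    apply List.filterMap_congr
    intro k _
    have h1 : ((1 + 2 * (k : Int)).toNat) = 2 * k + 1 := by omega
    rw [h1]
    simp

lemma zipfold_eq : ∀ (xs : List String) (d : PySem.Dict String String),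
    ((evensL xs).zip (if xs.length % 2 == 1 then oddsL xs ++ PySem.List.slice xs (some (-1)) none
                      else oddsL xs)).foldl (fun d kv => d.insert kv.1 kv.2) d = mwdLoop xs d := by
  intro xs
  induction xs using evensL.induct with
  | case1 => intro d; simp [evensL, mwdLoop]
  | case2 a =>
    intro d
    rw [PySem.List.slice_from_neg_one]
    simp [evensL, oddsL, mwdLoop]
  | case3 a b r ih =>
    intro d
    have hmod : ((a :: b :: r).length % 2 == 1) = (r.length % 2 == 1) := by
      simp only [List.length_cons]
      have : (r.length + 1 + 1) % 2 = r.length % 2 := by omega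
      rw [this]
    rw [hmod, PySem.List.slice_from_neg_one]
    by_cases hodd : (r.length % 2 == 1) = true
    · have hr : 1 ≤ r.length := by
        rcases r with _ | _ <;> simp_all
      have hdrop : (a :: b :: r).drop ((a :: b :: r).length - 1) = r.drop (r.length - 1) := by
        simp only [List.length_cons]
        rw [show r.length + 1 + 1 - 1 = (r.length - 1) + 1 + 1 by omega]
        simp
      rw [hodd, if_pos rfl, hdrop]
      have := ih (d.insert a b)
      rw [PySem.List.slice_from_neg_one, hodd, if_pos rfl] at this
      simpa [evensL, oddsL, mwdLoop] using this
    · rw [if_neg hodd]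
      have := ih (d.insert a b)
      rw [PySem.List.slice_from_neg_one, if_neg hodd] at this
      simpa [evensL, oddsL, mwdLoop] using this

-- ===== VERDICT (by name: the statement is the Claim_ definition above) =====
theorem make_word_dict_spec : Claim_equal_make_word_dict := by
  intro ws _
  unfold Spec_make_word_dict make_word_dict make_word_dict_alt
  rw [slice2_evens, slice2_odds]
  simp only [Option.getD_some]
  rw [zipfold_eq]
  cases ws with
  | nil => rfl
  | cons x xs =>
    simp only [List.length_cons, gt_iff_lt, Nat.succ_pos, if_pos]
    have h := mwd_loop_eq (x :: xs) PySem.Dict.empty "" 0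
    simpa using congrArg PySem.Dict.items h
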